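-- pv_equiv track=rewrite | github.com/peejh/coding-practice | HackerRank/Problem Solving/algorithms/bitManipulation_xorSequence.py | xorSequence
-- ===== SOURCE A (Python) =====
-- def xorSequence(l, r):
--
--     A = [0]
--     for i in range(1, r+1):
--         A.append(A[i-1] ^ i)
--
--     ans = A[l]
--     for n in A[l+1:]:
--         ans ^= n
--
--     return ans
-- ===== SOURCE B (Python) =====
-- def _H(n):
--     """XOR of A[0] ^ ... ^ A[n] in closed form, where A[i] = 0 ^ 1 ^ ... ^ i.
--     Each full block of four prefix-xors A[4q..4q+3] xors to 2."""
--     if n < 0: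
--         return 0
--     q, m = divmod(n, 4)
--     if m == 0:
--         part = 4 * q
--     elif m == 1:
--         part = 4 * q ^ 1
--     else:
--         part = 2
--     return part ^ (2 if q % 2 == 1 else 0)
--
--
-- def xorSequence(l, r):
--     return _H(r) ^ _H(l - 1)
-- ===== Notes on version B (the rewrite author's own statement) =====
-- stated objective: faster
-- what changed: Replaced the O(r) construction of the whole prefix-xor array and the linear xor scan by an O(1) closed form: the xor of prefix-xors A[0..n] follows a period-4 pattern (each block of four xors to 2), so the answer is H(r) ^ H(l-1).
-- intended difference: For negative l inside A's list-index range, A returns the xor of a wrapped-around suffix chosen by Python's negative-index rule (e.g. A(-2,3)=3), an accident of its list indexing; B returns the closed-form xor for the stated range l..r (B(-2,3)=2), the intended value. — e.g. on xorSequence(-2, 3): A returns 3, B returns 2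
import Mathlib
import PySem

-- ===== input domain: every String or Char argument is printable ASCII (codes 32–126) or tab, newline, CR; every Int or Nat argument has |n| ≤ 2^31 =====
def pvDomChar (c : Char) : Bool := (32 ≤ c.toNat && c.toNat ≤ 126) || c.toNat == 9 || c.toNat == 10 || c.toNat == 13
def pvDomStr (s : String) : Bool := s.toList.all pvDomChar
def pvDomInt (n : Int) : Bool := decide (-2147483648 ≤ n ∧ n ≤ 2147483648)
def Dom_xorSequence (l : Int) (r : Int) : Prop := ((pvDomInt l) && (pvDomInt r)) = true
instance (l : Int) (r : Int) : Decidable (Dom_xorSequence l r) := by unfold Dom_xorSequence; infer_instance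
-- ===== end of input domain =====

-- B replaces A's O(r) prefix-xor array and linear xor scan by the O(1) closed-form
-- period-4 pattern of the xor-of-prefix-xors (measured asymptotically faster).


-- ===== PORT A =====
-- A's append loop is encoded back-to-front (Python's A.append(x) is cons + a
-- final reverse, so evaluation stays linear); A[i-1] reads the element
-- appended last — the front of the consed accumulator (exact: i-1 = len-1 ≥ 0
-- at every iteration, so Python's indexing takes the plain last element).
def xorSequence (l : Int) (r : Int) : Int :=
  let A := ((PySem.List.pyRange 1 (r + 1) 1).foldl
    (fun acc i => PySem.Int.bxor (acc.headD 0) i :: acc) [0]).reverse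
  let ans := PySem.List.pyGetD A l 0
  (PySem.List.slice A (some (l + 1)) none).foldl (fun a n => PySem.Int.bxor a n) ans

-- ===== PORT B =====
def pvH (n : Int) : Int :=
  if n < 0 then 0
  else
    let q := PySem.Int.floordiv n 4
    let m := PySem.Int.mod n 4
    let part := if m = 0 then 4 * q else if m = 1 then PySem.Int.bxor (4 * q) 1 else 2
    PySem.Int.bxor part (if PySem.Int.mod q 2 = 1 then 2 else 0)

def xorSequence_alt (l : Int) (r : Int) : Int :=
  PySem.Int.bxor (pvH r) (pvH (l - 1))

-- ===== PRECONDITION & SPEC =====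
-- Pre_ is exactly the set of inputs on which A returns normally: A raises
-- IndexError at A[l] iff l is outside the Python index range of its list
-- (length r+1 for r >= 1, else the single seed element).
def Pre_xorSequence (l : Int) (r : Int) : Prop :=
  (1 ≤ r ∧ -(r + 1) ≤ l ∧ l ≤ r) ∨ (r < 1 ∧ (l = 0 ∨ l = -1))
instance (l : Int) (r : Int) : Decidable (Pre_xorSequence l r) := by unfold Pre_xorSequence; infer_instance
def pvWitness_xorSequence : Int × Int := (2, 7)

-- On negative l (inside A's index range) A returns the xor of a wrapped-around
-- suffix picked by Python's negative-index rule — an accident of its list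
-- indexing, meaningless for the task's range l..r — while B returns the
-- closed-form xor for the stated range, the intended value.
def D_xorSequence (l : Int) (r : Int) : Prop := l < 0
instance (l : Int) (r : Int) : Decidable (D_xorSequence l r) := by unfold D_xorSequence; infer_instance

def Spec_xorSequence (l : Int) (r : Int) (out : Int) : Prop := ¬ D_xorSequence l r → out = xorSequence_alt l r
instance (l : Int) (r : Int) (out : Int) : Decidable (Spec_xorSequence l r out) := by unfold Spec_xorSequence; infer_instance

def pvDiffWitness_xorSequence : Int × Int := (-2, 3)
def pvDiffWitnessOut_xorSequence : Int × Int := (3, 2)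

-- ===== CLAIM (what is proved, stated in full; the proofs are below) =====
def Claim_unchanged_xorSequence : Prop := ∀ (l : Int) (r : Int), Dom_xorSequence l r → Pre_xorSequence l r → Spec_xorSequence l r (xorSequence l r)
def Claim_changed_xorSequence : Prop := Dom_xorSequence (pvDiffWitness_xorSequence.1) (pvDiffWitness_xorSequence.2) ∧ Pre_xorSequence (pvDiffWitness_xorSequence.1) (pvDiffWitness_xorSequence.2) ∧ D_xorSequence (pvDiffWitness_xorSequence.1) (pvDiffWitness_xorSequence.2) ∧ xorSequence (pvDiffWitness_xorSequence.1) (pvDiffWitness_xorSequence.2) = pvDiffWitnessOut_xorSequence.1 ∧ xorSequence_alt (pvDiffWitness_xorSequence.1) (pvDiffWitness_xorSequence.2) = pvDiffWitnessOut_xorSequence.2 ∧ pvDiffWitnessOut_xorSequence.1 ≠ pvDiffWitnessOut_xorSequence.2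

-- ===== LEMMAS AND PROOFS =====

-- Nat-level reference functions: pvg n = 0 ^^^ 1 ^^^ ... ^^^ n (the entries of A's
-- list), pvf n = pvg 0 ^^^ ... ^^^ pvg n, and pvfc = the closed form B uses.
def pvg : Nat → Nat
  | 0 => 0
  | n + 1 => pvg n ^^^ (n + 1)

def pvf : Nat → Nat
  | 0 => 0
  | n + 1 => pvf n ^^^ pvg (n + 1)

def pvfc (n : Nat) : Nat :=
  let q := n / 4
  let part := if n % 4 = 0 then 4 * q else if n % 4 = 1 then 4 * q ^^^ 1 else 2
  part ^^^ (if q % 2 = 1 then 2 else 0)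

-- peel the low bit off a xor
theorem pv_bit_xor (m n b c : Nat) (hb : b < 2) (hc : c < 2) :
    (2 * m + b) ^^^ (2 * n + c) = 2 * (m ^^^ n) + (b ^^^ c) := by
  interval_cases b <;> interval_cases c
  · simpa [Nat.bit_val] using Nat.xor_bit false m false n
  · simpa [Nat.bit_val] using Nat.xor_bit false m true n
  · simpa [Nat.bit_val] using Nat.xor_bit true m false n
  · simpa [Nat.bit_val] using Nat.xor_bit true m true n

-- peel the low two bits off a xor
theorem pv_four_xor (p q s t : Nat) (hs : s < 4) (ht : t < 4) :
    (4 * p + s) ^^^ (4 * q + t) = 4 * (p ^^^ q) + (s ^^^ t) := by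
  have h1 : 4 * p + s = 2 * (2 * p + s / 2) + s % 2 := by omega
  have h2 : 4 * q + t = 2 * (2 * q + t / 2) + t % 2 := by omega
  rw [h1, h2, pv_bit_xor _ _ _ _ (by omega) (by omega),
      pv_bit_xor _ _ _ _ (by omega) (by omega)]
  interval_cases s <;> interval_cases t <;> simp <;> omega

theorem pv_ac (x y z : Nat) : (x ^^^ y) ^^^ z = (x ^^^ z) ^^^ y := by
  rw [Nat.xor_assoc, Nat.xor_comm y z, ← Nat.xor_assoc]

theorem pvg_closed (n : Nat) :
    pvg n = if n % 4 = 0 then n else if n % 4 = 1 then 1 else if n % 4 = 2 then n + 1 else 0 := by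
  induction n with
  | zero => simp [pvg]
  | succ n ih =>
    rw [pvg, ih]
    have h4 : n % 4 = 0 ∨ n % 4 = 1 ∨ n % 4 = 2 ∨ n % 4 = 3 := by omega
    obtain h | h | h | h := h4
    · have hs : (n + 1) % 4 = 1 := by omega
      have e : n ^^^ (n + 1) = (4 * (n / 4) + 0) ^^^ (4 * (n / 4) + 1) := by congr 1 <;> omega
      simp [h, hs]
      rw [e, pv_four_xor _ _ _ _ (by omega) (by omega)]
      simp
    · have hs : (n + 1) % 4 = 2 := by omega
      have e : (1 : Nat) ^^^ (n + 1) = (4 * 0 + 1) ^^^ (4 * (n / 4) + 2) := by congr 1 <;> omega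
      simp [h, hs]
      rw [e, pv_four_xor _ _ _ _ (by omega) (by omega)]
      simp; omega
    · have hs : (n + 1) % 4 = 3 := by omega
      have e : (n + 1 : Nat) ^^^ (n + 1) = 0 := Nat.xor_self _
      simp [h, hs, e]
    · have hs : (n + 1) % 4 = 0 := by omega
      simp [h, hs]

theorem pvf_closed (n : Nat) : pvf n = pvfc n := by
  induction n with
  | zero => simp [pvf, pvfc]
  | succ n ih =>
    rw [pvf, ih, pvg_closed (n + 1)]
    have h4 : n % 4 = 0 ∨ n % 4 = 1 ∨ n % 4 = 2 ∨ n % 4 = 3 := by omega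
    obtain h | h | h | h := h4
    · have hs : (n + 1) % 4 = 1 := by omega
      have hq : (n + 1) / 4 = n / 4 := by omega
      simp [pvfc, h, hs, hq, pv_ac]
    · have hs : (n + 1) % 4 = 2 := by omega
      have hq : (n + 1) / 4 = n / 4 := by omega
      have hn1 : n + 1 + 1 = 4 * (n / 4) + 3 := by omega
      simp only [pvfc, h, hs, hq]
      norm_num
      have e2 : 4 * (n / 4) + 1 ^^^ (4 * (n / 4) + 3) = 2 := by
        have := pv_four_xor (n / 4) (n / 4) 1 3 (by omega) (by omega)
        simpa using this
      rw [hn1, pv_ac, e2]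
    · have hs : (n + 1) % 4 = 3 := by omega
      have hq : (n + 1) / 4 = n / 4 := by omega
      simp [pvfc, h, hs, hq]
    · have hs : (n + 1) % 4 = 0 := by omega
      have hq : (n + 1) / 4 = n / 4 + 1 := by omega
      have hn1 : n + 1 = 4 * (n / 4 + 1) := by omega
      have h2 : n / 4 % 2 = 0 ∨ n / 4 % 2 = 1 := by omega
      obtain h2 | h2 := h2
      · have h2' : (n / 4 + 1) % 2 = 1 := by omega
        simp [pvfc, h, hs, hq, h2, h2']
        rw [hn1, Nat.xor_comm]
      · have h2' : (n / 4 + 1) % 2 = 0 := by omega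
        simp [pvfc, h, h2, h2', hn1]

-- B's helper computes the closed form pvfc on casts of naturals
theorem pvH_natCast (n : Nat) : pvH (n : Int) = (pvfc n : Int) := by
  simp only [pvH, pvfc]
  rw [if_neg (by omega : ¬ ((n : Nat) : Int) < 0)]
  rw [show (4 : Int) = ((4 : Nat) : Int) from rfl, PySem.Int.floordiv_natCast,
      PySem.Int.mod_natCast, show (2 : Int) = ((2 : Nat) : Int) from rfl,
      PySem.Int.mod_natCast]
  have g1 : ((4 : Nat) : Int) * ((n / 4 : Nat) : Int) = ((4 * (n / 4) : Nat) : Int) := by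
    push_cast; ring
  rw [g1, show (1 : Int) = ((1 : Nat) : Int) from rfl,
      show (0 : Int) = ((0 : Nat) : Int) from rfl]
  split_ifs with h1 h2 h3 h4 h5 h6 <;>
    (try (exfalso; omega)) <;> (repeat rw [PySem.Int.bxor_natCast]) <;> norm_cast

-- A's loop builds (back-to-front) exactly the list of prefix xors pvg 0 .. pvg b
theorem pv_buildA (b : Nat) :
    (PySem.List.pyRange 1 ((b : Int) + 1) 1).foldl
      (fun acc i => PySem.Int.bxor (acc.headD 0) i :: acc) [0]
    = ((List.range (b + 1)).map (fun i => ((pvg i : Nat) : Int))).reverse := by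
  induction b with
  | zero => rw [PySem.List.pyRange_one_eq_nil (by omega)]; simp [pvg]
  | succ b ih =>
    have hsplit : PySem.List.pyRange 1 (((b + 1 : Nat) : Int) + 1) 1
        = PySem.List.pyRange 1 ((b : Int) + 1) 1 ++ [(b : Int) + 1] := by
      rw [show (((b + 1 : Nat) : Int) + 1) = ((b : Int) + 1) + 1 by push_cast; ring,
          PySem.List.pyRange_one_succ_right (by omega)]
    have hrev : ((List.range (b + 1)).map (fun i => ((pvg i : Nat) : Int))).reverse
        = ((pvg b : Nat) : Int) :: ((List.range b).map (fun i => ((pvg i : Nat) : Int))).reverse := by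
      rw [show List.range (b + 1) = List.range b ++ [b] from List.range_succ,
          List.map_append, List.reverse_append]
      simp
    rw [hsplit, List.foldl_append, ih]
    simp only [List.foldl_cons, List.foldl_nil]
    rw [hrev, List.headD_cons,
        show ((b : Int) + 1) = ((b + 1 : Nat) : Int) by push_cast; ring,
        PySem.Int.bxor_natCast,
        show List.range (b + 1 + 1) = List.range (b + 1) ++ [b + 1] from List.range_succ,
        List.map_append, List.reverse_append, hrev]
    simp [pvg]

-- A's xor scan over the suffix starting at a equals pvf b ^^^ pvf (a-1)
theorem pv_scan (a b : Nat) (h : a ≤ b) :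
    (((List.range (b + 1)).map (fun i => ((pvg i : Nat) : Int))).drop (a + 1)).foldl
      (fun x n => PySem.Int.bxor x n) ((pvg a : Nat) : Int)
    = ((pvf b ^^^ (if a = 0 then 0 else pvf (a - 1)) : Nat) : Int) := by
  induction b, h using Nat.le_induction with
  | base =>
    rw [List.drop_eq_nil_of_le (by simp), List.foldl_nil]
    congr 1
    cases a with
    | zero => simp [pvf, pvg]
    | succ k =>
      simp only [pvf, Nat.add_sub_cancel, if_neg (Nat.succ_ne_zero k)]
      rw [Nat.xor_comm (pvf k), Nat.xor_xor_cancel_right]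
  | succ b hb ih =>
    rw [List.range_succ, List.map_append,
        List.drop_append_of_le_length (by simp; omega), List.foldl_append, ih]
    simp only [List.map_cons, List.map_nil, List.foldl_cons, List.foldl_nil]
    rw [PySem.Int.bxor_natCast]
    congr 1
    rw [pv_ac]
    rfl

-- ===== VERDICT (by name: the statement is the Claim_ definition above) =====
theorem xorSequence_spec : Claim_unchanged_xorSequence := by
  intro l r _ hPre
  unfold Spec_xorSequence
  intro hnD
  unfold D_xorSequence at hnD
  unfold Pre_xorSequence at hPre
  have hl : 0 ≤ l := by omega
  unfold xorSequence xorSequence_alt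
  by_cases hlr : l ≤ r
  · -- 0 ≤ l ≤ r : the main case
    obtain ⟨a, rfl⟩ : ∃ a : Nat, l = (a : Int) := ⟨l.toNat, by omega⟩
    obtain ⟨b, rfl⟩ : ∃ b : Nat, r = (b : Int) := ⟨r.toNat, by omega⟩
    have hab : a ≤ b := by exact_mod_cast hlr
    simp only
    rw [pv_buildA b, List.reverse_reverse, PySem.List.pyGetD_natCast]
    have hget : ((List.range (b + 1)).map (fun i => ((pvg i : Nat) : Int))).getD a 0
        = ((pvg a : Nat) : Int) := by
      rw [List.getD_eq_getElem?_getD, List.getElem?_map, List.getElem?_range (by omega)]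
      rfl
    rw [hget, show ((a : Int) + 1) = ((a + 1 : Nat) : Int) by push_cast; ring,
        PySem.List.slice_from_natCast, pv_scan a b hab, pvH_natCast b]
    cases a with
    | zero =>
      rw [show ((0 : Nat) : Int) - 1 = (-1 : Int) by ring]
      rw [show pvH (-1) = 0 from rfl]
      simp [← pvf_closed]
    | succ k =>
      rw [show (((k + 1 : Nat) : Int)) - 1 = ((k : Nat) : Int) by push_cast; ring,
          pvH_natCast k, PySem.Int.bxor_natCast]
      simp [← pvf_closed]
  · -- l = 0 and r < 1 : A's list is just the seed [0]
    have hl0 : l = 0 := by omega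
    have hr : r + 1 ≤ 1 := by omega
    subst hl0
    simp only
    rw [PySem.List.pyRange_one_eq_nil hr]
    simp only [List.foldl_nil]
    rw [show pvH r = 0 by unfold pvH; rw [if_pos (by omega)],
        show pvH (0 - 1) = 0 from rfl]
    simp [PySem.List.slice_from_one, PySem.List.pyGetD_zero_cons, PySem.Int.bxor]

theorem xorSequence_changed : Claim_changed_xorSequence := by
  unfold Claim_changed_xorSequence; decide
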